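-- pv_equiv track=rewrite | github.com/spirali/elsie | elsie/textparser.py | extract_line
-- ===== SOURCE A (Python) =====
-- END_MARKER = ("end", None)
--
-- def _open_blocks(tokens):
--     blocks = []
--     for token in tokens:
--         if token[0] == "begin":
--             blocks.append(token)
--         elif token[0] == "end":
--             blocks.pop()
--     return blocks
--
-- def _open_blocks_count(tokens):
--     count = 0
--     for token in tokens:
--         if token[0] == "begin":
--             count += 1
--         elif token[0] == "end":
--             count -= 1
--     return count
--
-- def extract_line(tokens, index):
--     b = index
--     while b >= 0 and tokens[b][0] != "newline":
--         b -= 1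
--     b += 1
--
--     e = index
--     while e < len(tokens) and tokens[e][0] != "newline":
--         e += 1
--
--     open_blocks = _open_blocks(tokens[:b])
--     result = open_blocks + tokens[b:e]
--     result += [END_MARKER] * _open_blocks_count(result)
--     return result, index - b + len(open_blocks)
-- ===== SOURCE B (Python) =====
-- END_MARKER = ("end", None)
--
--
-- def extract_line(tokens, index):
--     # One forward pass: walk the token list line by line, keeping the stack of
--     # currently open "begin" tokens, until we reach the line containing `index`.
--     if not 0 <= index < len(tokens):
--         raise IndexError("token index out of range")
--     stack = []
--     b = 0
--     e = 0
--     while e < len(tokens) and tokens[e][0] != "newline":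
--         e += 1
--     while index >= e:
--         # consume this whole line into the open-block stack
--         for t in tokens[b:e]:
--             if t[0] == "begin":
--                 stack.append(t)
--             elif t[0] == "end":
--                 stack.pop()
--         if index == e:
--             # `index` is the newline itself: empty line starting right after it
--             b = e + 1
--             e = index
--             break
--         b = e + 1
--         e = b
--         while e < len(tokens) and tokens[e][0] != "newline":
--             e += 1
--     line = tokens[b:e]
--     count = len(stack)
--     for t in line:
--         if t[0] == "begin":
--             count += 1
--         elif t[0] == "end":
--             count -= 1
--     result = stack + line
--     if count > 0:
--         result += [END_MARKER] * count
--     return result, index - b + len(stack)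
-- ===== Notes on version B (the rewrite author's own statement) =====
-- stated objective: alternative
-- what changed: B replaces A's three separate scans (a backward scan from index for the line start, a forward scan for the line end, and a full re-fold of the prefix to rebuild open blocks) by one forward line-by-line pass that maintains the open-block stack incrementally and stops at the line containing index.
-- outside the precondition, e.g. on extract_line([('text', None), ('newline', None)], -2): A returns ([], -1), B raises IndexError
import Mathlib
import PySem

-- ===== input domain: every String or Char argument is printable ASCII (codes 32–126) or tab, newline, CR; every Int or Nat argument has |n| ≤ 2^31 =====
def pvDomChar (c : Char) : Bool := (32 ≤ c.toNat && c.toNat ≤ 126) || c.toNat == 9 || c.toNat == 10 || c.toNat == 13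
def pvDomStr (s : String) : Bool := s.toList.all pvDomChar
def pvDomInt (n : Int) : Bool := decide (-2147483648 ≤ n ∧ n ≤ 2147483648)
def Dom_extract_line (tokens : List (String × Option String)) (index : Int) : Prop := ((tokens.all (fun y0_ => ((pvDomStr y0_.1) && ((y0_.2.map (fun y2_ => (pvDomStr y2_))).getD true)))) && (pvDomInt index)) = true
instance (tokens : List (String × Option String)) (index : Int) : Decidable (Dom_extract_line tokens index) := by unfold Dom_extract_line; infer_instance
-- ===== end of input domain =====

-- B does one forward line-by-line pass maintaining the open-block stack instead of A's
-- backward scan + forward scan + full prefix re-fold; same values on Pre_ (alternative decomposition, no speed claim).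

-- ===== PORT A =====

-- A's _open_blocks: fold over the prefix; blocks.pop() on an empty stack is Python's
-- IndexError, modelled by `none` (such inputs are outside Pre_).
def aStep (st : Option (List (String × Option String))) (t : String × Option String) :
    Option (List (String × Option String)) :=
  match st with
  | none => none
  | some bs =>
    if t.1 = "begin" then some (bs ++ [t])
    else if t.1 = "end" then
      match bs with
      | [] => none
      | _ :: _ => some bs.dropLast
    else some bs

def aOpenBlocks (ts : List (String × Option String)) : Option (List (String × Option String)) :=
  ts.foldl aStep (some [])

-- A's _open_blocks_count
def aCount (ts : List (String × Option String)) : Int :=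
  ts.foldl (fun c t => if t.1 = "begin" then c + 1 else if t.1 = "end" then c - 1 else c) 0

-- A's first while loop: `while b >= 0 and tokens[b][0] != "newline": b -= 1` then `b += 1`;
-- inside Pre_ every access is in range, so getD with a non-"newline" default is exact there.
def aLoopB (tokens : List (String × Option String)) (b : Nat) : Nat :=
  if (tokens.getD b ("", none)).1 = "newline" then b + 1
  else match b with
    | 0 => 0
    | Nat.succ b' => aLoopB tokens b'
termination_by b

-- A's second while loop: `while e < len(tokens) and tokens[e][0] != "newline": e += 1`.
def aLoopE (tokens : List (String × Option String)) (e : Nat) : Nat :=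
  if e < tokens.length then
    (if (tokens.getD e ("", none)).1 = "newline" then e else aLoopE tokens (e + 1))
  else e
termination_by tokens.length - e

def extract_line (tokens : List (String × Option String)) (index : Int) :
    (List (String × Option String)) × Int :=
  -- Python raises IndexError for index ≥ len(tokens), and wraps negative indices;
  -- both are outside Pre_, so this totality guard returns a junk value there.
  if index < 0 ∨ (tokens.length : Int) ≤ index then ([], 0)
  else
    let i := index.toNat
    let b := aLoopB tokens i
    let e := aLoopE tokens i
    match aOpenBlocks (tokens.take b) with
    | none => ([], 0)  -- blocks.pop() raised (outside Pre_)
    | some ob =>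
      -- tokens[b:e] with 0 ≤ b, 0 ≤ e is exactly take/drop with Nat subtraction
      let res := ob ++ (tokens.drop b).take (e - b)
      let res := res ++ List.replicate (aCount res).toNat ("end", (none : Option String))
      (res, index - (b : Int) + (ob.length : Int))

-- ===== PORT B =====

-- Source B's inner `while e < len(tokens) and tokens[e][0] != "newline": e += 1`
def bScanE (tokens : List (String × Option String)) (e : Nat) : Nat :=
  if e < tokens.length then
    (if (tokens.getD e ("", none)).1 = "newline" then e else bScanE tokens (e + 1))
  else e
termination_by tokens.length - e

-- needed by bLoop's termination proof, so stated above it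
theorem bScanE_ge (tokens : List (String × Option String)) (e : Nat) : e ≤ bScanE tokens e := by
  fun_induction bScanE tokens e with
  | case1 => omega
  | case2 e _ _ ih => omega
  | case3 => omega

-- Source B's `for t in tokens[b:e]` consuming a line into the stack; stack.pop() on empty = none
def bConsume (stack : List (String × Option String)) (seg : List (String × Option String)) :
    Option (List (String × Option String)) :=
  match seg with
  | [] => some stack
  | t :: rest =>
    if t.1 = "begin" then bConsume (stack ++ [t]) rest
    else if t.1 = "end" then
      match stack with
      | [] => none
      | _ :: _ => bConsume stack.dropLast rest
    else bConsume stack rest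

-- Source B's outer `while index >= e` loop; invariant: e = bScanE tokens b
def bLoop (tokens : List (String × Option String)) (index : Int)
    (stack : List (String × Option String)) (b e : Nat) :
    Option ((List (String × Option String)) × Nat × Nat) :=
  if index < (e : Int) then some (stack, b, e)
  else
    match bConsume stack ((tokens.drop b).take (e - b)) with
    | none => none  -- stack.pop() raised (outside Pre_)
    | some st =>
      if index = (e : Int) then some (st, e + 1, e)
      else bLoop tokens index st (e + 1) (bScanE tokens (e + 1))
termination_by (index + 1 - (e : Int)).toNat
decreasing_by
  have h1 := bScanE_ge tokens (e + 1)
  omega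

def extract_line_alt (tokens : List (String × Option String)) (index : Int) :
    (List (String × Option String)) × Int :=
  -- Source B validates the index up front and raises IndexError otherwise (outside Pre_)
  if index < 0 ∨ (tokens.length : Int) ≤ index then ([], 0)
  else
  match bLoop tokens index [] 0 (bScanE tokens 0) with
  | none => ([], 0)  -- stack.pop() raised (outside Pre_)
  | some (stack, b, e) =>
    let line := (tokens.drop b).take (e - b)
    let count := line.foldl
      (fun c t => if t.1 = "begin" then c + 1 else if t.1 = "end" then c - 1 else c)
      ((stack.length : Int))
    let res := stack ++ line
    let res := if 0 < count then res ++ List.replicate count.toNat ("end", (none : Option String)) else res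
    (res, index - (b : Int) + (stack.length : Int))

-- ===== PRECONDITION & SPEC =====

-- start of the line containing position i: one past the last "newline" at a position ≤ i
def pvLineStart (tokens : List (String × Option String)) (i : Nat) : Nat :=
  (List.range (i + 1)).foldl
    (fun acc p => if (tokens.getD p ("", none)).1 = "newline" then p + 1 else acc) 0

-- Pre_ excludes exactly the inputs where A does not behave as a line extractor:
-- index ≥ len(tokens) (A raises IndexError), prefixes before the line start whose "end"
-- tokens outnumber the "begin"s (A raises IndexError from pop), and index < 0, where
-- Python's negative-index wraparound gives A accidental values; B treats those as
-- before-the-start and returns the first line there.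
def Pre_extract_line (tokens : List (String × Option String)) (index : Int) : Prop :=
  0 ≤ index ∧ index < tokens.length ∧
    ∀ k ≤ pvLineStart tokens index.toNat,
      (tokens.take k).countP (fun t => t.1 = "end") ≤
        (tokens.take k).countP (fun t => t.1 = "begin")

instance (tokens : List (String × Option String)) (index : Int) :
    Decidable (Pre_extract_line tokens index) := by unfold Pre_extract_line; infer_instance

def pvWitness_extract_line : (List (String × Option String)) × Int :=
  ([("text", some "a"), ("newline", none), ("begin", some "b"), ("text", none)], 0)

def Spec_extract_line (tokens : List (String × Option String)) (index : Int)
    (out : (List (String × Option String)) × Int) : Prop := out = extract_line_alt tokens index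
instance (tokens : List (String × Option String)) (index : Int)
    (out : (List (String × Option String)) × Int) : Decidable (Spec_extract_line tokens index out) := by
  unfold Spec_extract_line; infer_instance

-- ===== CLAIM (what is proved, stated in full; the proofs are below) =====
def Claim_equal_extract_line : Prop := ∀ (tokens : List (String × Option String)) (index : Int), Dom_extract_line tokens index → Pre_extract_line tokens index → Spec_extract_line tokens index (extract_line tokens index)

-- ===== LEMMAS AND PROOFS =====

theorem bScanE_no_nl (tokens : List (String × Option String)) (e p : Nat)
    (h1 : e ≤ p) (h2 : p < bScanE tokens e) :
    ¬ (tokens.getD p ("", none)).1 = "newline" := by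
  fun_induction bScanE tokens e generalizing p with
  | case1 => omega
  | case2 e _ hnl ih =>
    rcases Nat.eq_or_lt_of_le h1 with h | h
    · exact h ▸ hnl
    · exact ih p h h2
  | case3 => omega

theorem bScanE_stop (tokens : List (String × Option String)) (e : Nat)
    (h : bScanE tokens e < tokens.length) :
    (tokens.getD (bScanE tokens e) ("", none)).1 = "newline" := by
  fun_induction bScanE tokens e with
  | case1 e hlt hnl => exact hnl
  | case2 e _ _ ih => exact ih h
  | case3 hlen => omega

theorem bScanE_of_between (tokens : List (String × Option String)) (e i : Nat)
    (h1 : e ≤ i) (h2 : i ≤ bScanE tokens e) : bScanE tokens i = bScanE tokens e := by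
  fun_induction bScanE tokens e generalizing i with
  | case1 e hlt hnl =>
    have : i = e := by omega
    subst this; rw [bScanE, if_pos hlt, if_pos hnl]
  | case2 e hlt hnl ih =>
    rcases Nat.eq_or_lt_of_le h1 with h | h
    · subst h; rw [bScanE, if_pos hlt, if_neg hnl]
    · exact ih i h h2
  | case3 e hlen =>
    have : i = e := by omega
    subst this; rw [bScanE, if_neg hlen]

theorem aLoopE_eq_bScanE (tokens : List (String × Option String)) (e : Nat) :
    aLoopE tokens e = bScanE tokens e := by
  fun_induction aLoopE tokens e with
  | case1 e hlt hnl => rw [bScanE, if_pos hlt, if_pos hnl]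
  | case2 e hlt hnl ih => rw [bScanE, if_pos hlt, if_neg hnl]; exact ih
  | case3 e hlen => rw [bScanE, if_neg hlen]

theorem aLoopB_newline (tokens : List (String × Option String)) (i : Nat)
    (h : (tokens.getD i ("", none)).1 = "newline") : aLoopB tokens i = i + 1 := by
  rw [aLoopB.eq_def, if_pos h]

theorem aLoopB_eq (tokens : List (String × Option String)) (b i : Nat)
    (hstart : b = 0 ∨ (tokens.getD (b - 1) ("", none)).1 = "newline")
    (h1 : b ≤ i) (h2 : i < bScanE tokens b) : aLoopB tokens i = b := by
  induction i using Nat.strong_induction_on with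
  | _ i ih =>
    have hnl : ¬ (tokens.getD i ("", none)).1 = "newline" := bScanE_no_nl tokens b i h1 h2
    rw [aLoopB.eq_def, if_neg hnl]
    match i, h1 with
    | 0, h1 => show 0 = b; omega
    | Nat.succ i', h1 =>
      show aLoopB tokens i' = b
      rcases Nat.eq_or_lt_of_le h1 with h | h
      · -- b = i'+1, so tokens[i'] = tokens[b-1] is a newline
        rcases hstart with h0 | hb1
        · omega
        · have : (tokens.getD i' ("", none)).1 = "newline" := by
            have : b - 1 = i' := by omega
            rwa [this] at hb1
          rw [aLoopB_newline tokens i' this]; omega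
      · exact ih i' (by omega) (by omega) (by omega)


theorem aLoopB_ge (tokens : List (String × Option String)) (e i : Nat)
    (h1 : e ≤ i) (hnl : (tokens.getD e ("", none)).1 = "newline") :
    e + 1 ≤ aLoopB tokens i := by
  induction i using Nat.strong_induction_on with
  | _ i ih =>
    by_cases hi : (tokens.getD i ("", none)).1 = "newline"
    · rw [aLoopB.eq_def, if_pos hi]; omega
    · have hne : e ≠ i := fun h => hi (h ▸ hnl)
      rw [aLoopB.eq_def, if_neg hi]
      match i, h1, hne with
      | 0, h1, hne => omega
      | Nat.succ i', h1, hne =>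
        show e + 1 ≤ aLoopB tokens i'
        exact ih i' (by omega) (by omega)

theorem foldl_aStep_none (seg : List (String × Option String)) :
    seg.foldl aStep none = none := by
  induction seg with
  | nil => rfl
  | cons t rest ih => rw [List.foldl_cons]; exact ih

theorem bConsume_eq_foldl (stack : List (String × Option String))
    (seg : List (String × Option String)) :
    bConsume stack seg = seg.foldl aStep (some stack) := by
  induction seg generalizing stack with
  | nil => rfl
  | cons t rest ih =>
    simp only [bConsume, List.foldl_cons]
    by_cases hb : t.1 = "begin"
    · rw [if_pos hb]; rw [ih]; congr 1; simp [aStep, hb]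
    · by_cases he : t.1 = "end"
      · rw [if_neg hb, if_pos he]
        match stack with
        | [] => simp [aStep, he, foldl_aStep_none]
        | s :: ss => rw [ih]; simp [aStep, he]
      · rw [if_neg hb, if_neg he, ih]; congr 1; simp [aStep, hb, he]


theorem aOpenBlocks_take (tokens : List (String × Option String)) (b e : Nat) (hbe : b ≤ e) :
    aOpenBlocks (tokens.take e) =
      ((tokens.drop b).take (e - b)).foldl aStep (aOpenBlocks (tokens.take b)) := by
  have h : tokens.take e = tokens.take b ++ (tokens.drop b).take (e - b) := by
    rw [← List.take_add]
    congr 1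
    omega
  rw [h]
  unfold aOpenBlocks
  rw [List.foldl_append]

theorem aOpenBlocks_none_mono (tokens : List (String × Option String)) (e m : Nat)
    (h1 : e ≤ m) (h2 : aOpenBlocks (tokens.take e) = none) :
    aOpenBlocks (tokens.take m) = none := by
  rw [aOpenBlocks_take tokens e m h1, h2, foldl_aStep_none]

theorem foldl_aStep_all_begin (ts : List (String × Option String)) :
    ∀ (st0 st : List (String × Option String)), (∀ t ∈ st0, t.1 = "begin") →
      ts.foldl aStep (some st0) = some st → ∀ t ∈ st, t.1 = "begin" := by
  induction ts with
  | nil => intro st0 st h0 h; cases h; exact h0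
  | cons t rest ih =>
    intro st0 st h0 h
    rw [List.foldl_cons] at h
    by_cases hb : t.1 = "begin"
    · refine ih (st0 ++ [t]) st ?_ ?_
      · intro x hx
        rcases List.mem_append.1 hx with hx | hx
        · exact h0 x hx
        · simp at hx; subst hx; exact hb
      · rw [← h]; congr 1; simp [aStep, hb]
    · by_cases he : t.1 = "end"
      · match st0 with
        | [] =>
          rw [show aStep (some []) t = none by simp [aStep, he], foldl_aStep_none] at h
          cases h
        | s :: ss =>
          refine ih (s :: ss).dropLast st ?_ ?_
          · intro x hx
            exact h0 x (List.dropLast_sublist (s :: ss) |>.mem hx)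
          · rw [← h]; congr 1; simp [aStep, he]
      · refine ih st0 st h0 ?_
        rw [← h]; congr 1; simp [aStep, hb, he]

theorem aOpenBlocks_all_begin (ts st : List (String × Option String))
    (h : aOpenBlocks ts = some st) : ∀ t ∈ st, t.1 = "begin" :=
  foldl_aStep_all_begin ts [] st (by simp) h

theorem aCount_foldl_init (ts : List (String × Option String)) (c : Int) :
    ts.foldl (fun c t => if t.1 = "begin" then c + 1 else if t.1 = "end" then c - 1 else c) c
      = c + aCount ts := by
  induction ts generalizing c with
  | nil => simp [aCount]
  | cons t rest ih =>
    rw [List.foldl_cons]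
    have hc : aCount (t :: rest) =
        (if t.1 = "begin" then (0 : Int) + 1 else if t.1 = "end" then 0 - 1 else 0) + aCount rest :=
      ih (if t.1 = "begin" then (0 : Int) + 1 else if t.1 = "end" then 0 - 1 else 0)
    rw [ih, hc]
    split_ifs <;> ring

theorem aCount_append (l1 l2 : List (String × Option String)) :
    aCount (l1 ++ l2) = aCount l1 + aCount l2 := by
  unfold aCount
  rw [List.foldl_append, aCount_foldl_init]
  rfl

theorem aCount_all_begin (l : List (String × Option String)) (h : ∀ t ∈ l, t.1 = "begin") :
    aCount l = (l.length : Int) := by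
  induction l with
  | nil => simp [aCount]
  | cons t rest ih =>
    have ht : t.1 = "begin" := h t (by simp)
    have : aCount (t :: rest) = 1 + aCount rest := by
      unfold aCount
      rw [List.foldl_cons, aCount_foldl_init, if_pos ht]
      unfold aCount
      ring
    rw [this, ih (fun x hx => h x (by simp [hx]))]
    simp
    ring

-- the master loop invariant relating B's single pass to A's three scans
theorem bLoop_correct (tokens : List (String × Option String)) (index : Int) :
    ∀ (n : Nat) (stack : List (String × Option String)) (b e : Nat),
      (index + 1 - (e : Int)).toNat = n →
      e = bScanE tokens b →
      (b : Int) ≤ index → index < tokens.length →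
      (b = 0 ∨ (tokens.getD (b - 1) ("", none)).1 = "newline") →
      aOpenBlocks (tokens.take b) = some stack →
      (match bLoop tokens index stack b e with
       | none => aOpenBlocks (tokens.take (aLoopB tokens index.toNat)) = none
       | some (st, b', e') =>
          b' = aLoopB tokens index.toNat ∧ e' = aLoopE tokens index.toNat ∧
            aOpenBlocks (tokens.take b') = some st) := by
  intro n
  induction n using Nat.strong_induction_on with
  | _ n IH =>
    intro stack b e hn he hb hlt hstart hstack
    rw [bLoop.eq_def]
    by_cases h : index < (e : Int)
    · rw [if_pos h]
      refine ⟨?_, ?_, hstack⟩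
      · exact (aLoopB_eq tokens b index.toNat hstart (by omega)
          (by rw [← he]; omega)).symm
      · rw [aLoopE_eq_bScanE,
          bScanE_of_between tokens b index.toNat (by omega) (by rw [← he]; omega)]
        exact he
    · rw [if_neg h]
      have hbe : b ≤ e := he ▸ bScanE_ge tokens b
      have he_len : e < tokens.length := by omega
      have hnl : (tokens.getD e ("", none)).1 = "newline" := by
        rw [he]; exact bScanE_stop tokens b (by rw [← he]; omega)
      have hcons : bConsume stack ((tokens.drop b).take (e - b)) =
          aOpenBlocks (tokens.take e) := by
        rw [bConsume_eq_foldl, aOpenBlocks_take tokens b e hbe, hstack]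
      rcases hc : bConsume stack ((tokens.drop b).take (e - b)) with _ | st
      · have h0 : aOpenBlocks (tokens.take e) = none := by rw [← hcons, hc]
        have hge : e + 1 ≤ aLoopB tokens index.toNat :=
          aLoopB_ge tokens e index.toNat (by omega) hnl
        exact aOpenBlocks_none_mono tokens e (aLoopB tokens index.toNat) (by omega) h0
      · have hsome : aOpenBlocks (tokens.take e) = some st := by rw [← hcons, hc]
        have hgetE : tokens[e]? = some (tokens.getD e ("", none)) := by
          rw [List.getElem?_eq_getElem he_len]
          rw [List.getD_eq_getElem tokens ("", none) he_len]
        have hopen1 : aOpenBlocks (tokens.take (e + 1)) = some st := by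
          unfold aOpenBlocks
          rw [List.take_add_one, hgetE, List.foldl_append]
          rw [show (tokens.take e).foldl aStep (some []) = some st from hsome]
          rw [show (some (tokens.getD e ("", none))).toList = [tokens.getD e ("", none)] from rfl]
          simp only [List.foldl_cons, List.foldl_nil]
          unfold aStep
          rw [hnl]
          simp
        by_cases heq : index = (e : Int)
        · simp only [if_pos heq]
          have hie : index.toNat = e := by omega
          refine ⟨?_, ?_, hopen1⟩
          · rw [hie, aLoopB_newline tokens e hnl]
          · rw [hie, aLoopE_eq_bScanE, bScanE, if_pos he_len, if_pos hnl]
        · simp only [if_neg heq]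
          have hg := bScanE_ge tokens (e + 1)
          exact IH (index + 1 - (bScanE tokens (e + 1) : Int)).toNat (by omega)
            st (e + 1) (bScanE tokens (e + 1)) rfl rfl (by omega) hlt
            (Or.inr (by simpa using hnl)) hopen1

-- ===== VERDICT (by name: the statement is the Claim_ definition above) =====
theorem extract_line_spec : Claim_equal_extract_line := by
  intro tokens index _ hpre
  obtain ⟨h0, h1, -⟩ := hpre
  unfold Spec_extract_line
  simp only [extract_line, extract_line_alt]
  rw [if_neg (by omega : ¬(index < 0 ∨ (tokens.length : Int) ≤ index)),
    if_neg (by omega : ¬(index < 0 ∨ (tokens.length : Int) ≤ index))]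
  have M := bLoop_correct tokens index (index + 1 - (bScanE tokens 0 : Int)).toNat
    [] 0 (bScanE tokens 0) rfl rfl (by omega) h1 (Or.inl rfl) (by simp [aOpenBlocks])
  rcases hbl : bLoop tokens index [] 0 (bScanE tokens 0) with _ | ⟨st, b', e'⟩
  · rw [hbl] at M
    rw [M]
  · rw [hbl] at M
    obtain ⟨hb', he', hopen⟩ := M
    rw [← hb', ← he', hopen]
    simp only []
    have hall : ∀ t ∈ st, t.1 = "begin" :=
      aOpenBlocks_all_begin (tokens.take b') st hopen
    have hcount : ((tokens.drop b').take (e' - b')).foldl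
        (fun c t => if t.1 = "begin" then c + 1 else if t.1 = "end" then c - 1 else c)
        ((st.length : Int))
        = aCount (st ++ (tokens.drop b').take (e' - b')) := by
      rw [aCount_append, aCount_all_begin st hall, aCount_foldl_init]
    rw [hcount]
    by_cases hpos : (0 : Int) < aCount (st ++ (tokens.drop b').take (e' - b'))
    · rw [if_pos hpos, List.append_assoc]
    · rw [if_neg hpos]
      rw [show (aCount (st ++ (tokens.drop b').take (e' - b'))).toNat = 0 by omega]
      simp
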